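-- pv_equiv track=rewrite | github.com/Haroong/Algorithm | BaekJoon Online Judge/Silver/12891-DNA 비밀번호.py | get_password_count
-- ===== SOURCE A (Python) =====
-- def count_substring_alphabet(substring):
--     alphabet = [0] * 4
--
--     for s in substring:
--         if s == 'A':
--             alphabet[0] += 1
--         elif s == 'C':
--             alphabet[1] += 1
--         elif s == 'G':
--             alphabet[2] += 1
--         else:
--             alphabet[3] += 1
--
--     return alphabet
--
-- def is_acceptable(alphabet_count, constraints):
--     if alphabet_count[0] >= constraints[0] and alphabet_count[1] >= constraints[1] and alphabet_count[2] >= constraints[2] and alphabet_count[3] >= constraints[3]: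
--         return True
--     else:
--         return False
--
-- def subtract_element(counting_list, str):
--     if str == 'A':
--         counting_list[0] -= 1
--     elif str == 'C':
--         counting_list[1] -= 1
--     elif str == 'G':
--         counting_list[2] -= 1
--     else:
--         counting_list[3] -= 1
--
--     return counting_list
--
-- def add_element(counting_list, str):
--     if str == 'A':
--         counting_list[0] += 1
--     elif str == 'C':
--         counting_list[1] += 1
--     elif str == 'G':
--         counting_list[2] += 1
--     else:
--         counting_list[3] += 1
--
--     return counting_list
--
-- def get_password_count(DNA, size, constraints):
--     result = 0
--
--     counting_list = count_substring_alphabet(DNA[:size]) # 초기 슬라이딩 윈도우 사이즈의 결과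
--     if is_acceptable(counting_list, constraints):
--         result += 1
--
--     for i in range(size, len(DNA)):
--         counting_list = subtract_element(counting_list, DNA[i - size]) # 슬라이딩 윈도우의 맨 첫번째 값 빼기
--         counting_list = add_element(counting_list, DNA[i]) # 현재 값 더하기
--         if is_acceptable(counting_list, constraints): # 비밀번호 생성 조건을 만족하는지 확인
--             result += 1
--
--     return result
-- ===== SOURCE B (Python) =====
-- def get_password_count(DNA, size, constraints):
--     n = len(DNA)
--     result = 0
--     for i in range(max(0, n - size) + 1):
--         window = DNA[i:i + size]
--         tally = [window.count('A'), window.count('C'), window.count('G'), 0]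
--         tally[3] = len(window) - tally[0] - tally[1] - tally[2]
--         if all(tally[k] >= constraints[k] for k in range(4)):
--             result += 1
--     return result
-- ===== Notes on version B (the rewrite author's own statement) =====
-- stated objective: simpler
-- what changed: Replaced the incremental subtract/add sliding-window count with an independent recount of each window DNA[i:i+size] using str.count, iterating max(0, len(DNA)-size)+1 windows.
import Mathlib
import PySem

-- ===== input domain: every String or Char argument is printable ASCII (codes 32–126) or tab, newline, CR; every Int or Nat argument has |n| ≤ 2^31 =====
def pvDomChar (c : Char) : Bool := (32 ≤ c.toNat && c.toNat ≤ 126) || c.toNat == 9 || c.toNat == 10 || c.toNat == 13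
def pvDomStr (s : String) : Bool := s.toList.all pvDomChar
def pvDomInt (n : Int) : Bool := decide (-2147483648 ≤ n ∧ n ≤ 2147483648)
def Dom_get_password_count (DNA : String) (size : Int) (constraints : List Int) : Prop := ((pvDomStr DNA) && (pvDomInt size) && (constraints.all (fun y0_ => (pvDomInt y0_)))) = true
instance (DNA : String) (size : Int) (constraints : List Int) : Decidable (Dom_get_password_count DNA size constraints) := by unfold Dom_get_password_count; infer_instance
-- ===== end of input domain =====

-- B recounts every window independently instead of maintaining an incremental sliding count; objective: simpler.

-- ===== PORT A =====
def count_substring_alphabet (substring : List Char) : Int × Int × Int × Int :=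
  substring.foldl
    (fun al s =>
      if s = 'A' then (al.1 + 1, al.2.1, al.2.2.1, al.2.2.2)
      else if s = 'C' then (al.1, al.2.1 + 1, al.2.2.1, al.2.2.2)
      else if s = 'G' then (al.1, al.2.1, al.2.2.1 + 1, al.2.2.2)
      else (al.1, al.2.1, al.2.2.1, al.2.2.2 + 1))
    (0, 0, 0, 0)

def is_acceptable (ac : Int × Int × Int × Int) (constraints : List Int) : Bool :=
  -- constraints[0..3]: Pre_ guarantees the list has length ≥ 4, where pyGetD is exact
  decide (PySem.List.pyGetD constraints 0 0 ≤ ac.1) &&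
  decide (PySem.List.pyGetD constraints 1 0 ≤ ac.2.1) &&
  decide (PySem.List.pyGetD constraints 2 0 ≤ ac.2.2.1) &&
  decide (PySem.List.pyGetD constraints 3 0 ≤ ac.2.2.2)

def subtract_element (cl : Int × Int × Int × Int) (str : Char) : Int × Int × Int × Int :=
  if str = 'A' then (cl.1 - 1, cl.2.1, cl.2.2.1, cl.2.2.2)
  else if str = 'C' then (cl.1, cl.2.1 - 1, cl.2.2.1, cl.2.2.2)
  else if str = 'G' then (cl.1, cl.2.1, cl.2.2.1 - 1, cl.2.2.2)
  else (cl.1, cl.2.1, cl.2.2.1, cl.2.2.2 - 1)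

def add_element (cl : Int × Int × Int × Int) (str : Char) : Int × Int × Int × Int :=
  if str = 'A' then (cl.1 + 1, cl.2.1, cl.2.2.1, cl.2.2.2)
  else if str = 'C' then (cl.1, cl.2.1 + 1, cl.2.2.1, cl.2.2.2)
  else if str = 'G' then (cl.1, cl.2.1, cl.2.2.1 + 1, cl.2.2.2)
  else (cl.1, cl.2.1, cl.2.2.1, cl.2.2.2 + 1)

def get_password_count (DNA : String) (size : Int) (constraints : List Int) : Int :=
  let l := DNA.toList
  let counting0 := count_substring_alphabet (PySem.List.slice l none (some size))
  let result0 : Int := if is_acceptable counting0 constraints then 1 else 0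
  -- DNA[i - size] / DNA[i]: Pre_ guarantees 0 ≤ size, where both indices are in range and pyGetD is exact
  let fin := (PySem.List.pyRange size ((l.length : Int)) 1).foldl
    (fun (st : (Int × Int × Int × Int) × Int) i =>
      let c1 := subtract_element st.1 (PySem.List.pyGetD l (i - size) ' ')
      let c2 := add_element c1 (PySem.List.pyGetD l i ' ')
      (c2, if is_acceptable c2 constraints then st.2 + 1 else st.2))
    (counting0, result0)
  fin.2

-- ===== PORT B =====
def get_password_count_alt (DNA : String) (size : Int) (constraints : List Int) : Int :=
  let l := DNA.toList
  let n : Int := l.length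
  (PySem.List.pyRange 0 (max 0 (n - size) + 1) 1).foldl
    (fun result i =>
      let w := PySem.List.slice l (some i) (some (i + size))
      let tally : List Int :=
        [ w.count 'A', w.count 'C', w.count 'G',
          (w.length : Int) - w.count 'A' - w.count 'C' - w.count 'G' ]
      if (PySem.List.pyRange 0 4 1).all
           (fun k => decide (PySem.List.pyGetD constraints k 0 ≤ PySem.List.pyGetD tally k 0))
      then result + 1 else result)
    0

-- ===== PRECONDITION & SPEC =====
-- Pre_ excludes exactly the inputs on which A raises IndexError: a negative size makes the
-- loop's DNA[i]/DNA[i-size] indexing go out of range, and with fewer than 4 constraints the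
-- short-circuited chain constraints[0..3] raises as soon as some examined window satisfies
-- every comparison that exists (the second disjunct says no window does).
def Pre_get_password_count (DNA : String) (size : Int) (constraints : List Int) : Prop :=
  0 ≤ size ∧
  (4 ≤ constraints.length ∨
    ∀ j ∈ List.range (DNA.toList.length - size.toNat + 1),
      ∃ t ∈ List.range constraints.length,
        (((DNA.toList.drop j).take size.toNat).count
            (if t = 0 then 'A' else if t = 1 then 'C' else 'G') : Int)
          < constraints.getD t 0)
instance (DNA : String) (size : Int) (constraints : List Int) : Decidable (Pre_get_password_count DNA size constraints) := by unfold Pre_get_password_count; infer_instance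

def pvWitness_get_password_count : String × Int × List Int := ("ACGTA", 3, [1, 0, 1, 0])

def Spec_get_password_count (DNA : String) (size : Int) (constraints : List Int) (out : Int) : Prop := out = get_password_count_alt DNA size constraints
instance (DNA : String) (size : Int) (constraints : List Int) (out : Int) : Decidable (Spec_get_password_count DNA size constraints out) := by unfold Spec_get_password_count; infer_instance

-- ===== CLAIM (what is proved, stated in full; the proofs are below) =====
def Claim_equal_get_password_count : Prop := ∀ (DNA : String) (size : Int) (constraints : List Int), Dom_get_password_count DNA size constraints → Pre_get_password_count DNA size constraints → Spec_get_password_count DNA size constraints (get_password_count DNA size constraints)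

-- ===== LEMMAS AND PROOFS =====

-- reference counts of a window: (count 'A', count 'C', count 'G', rest)
def pvCnt (w : List Char) : Int × Int × Int × Int :=
  ((w.count 'A' : Int), (w.count 'C' : Int), (w.count 'G' : Int),
   (w.length : Int) - w.count 'A' - w.count 'C' - w.count 'G')

theorem foldl_add_element (w : List Char) (st : Int × Int × Int × Int) :
    w.foldl
      (fun al s =>
        if s = 'A' then (al.1 + 1, al.2.1, al.2.2.1, al.2.2.2)
        else if s = 'C' then (al.1, al.2.1 + 1, al.2.2.1, al.2.2.2)
        else if s = 'G' then (al.1, al.2.1, al.2.2.1 + 1, al.2.2.2)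
        else (al.1, al.2.1, al.2.2.1, al.2.2.2 + 1)) st
    = (st.1 + w.count 'A', st.2.1 + w.count 'C', st.2.2.1 + w.count 'G',
       st.2.2.2 + ((w.length : Int) - w.count 'A' - w.count 'C' - w.count 'G')) := by
  induction w generalizing st with
  | nil => simp
  | cons c w ih =>
    simp only [List.foldl_cons, ih]
    by_cases hA : c = 'A' <;> by_cases hC : c = 'C' <;> by_cases hG : c = 'G' <;>
      simp_all [List.count_cons]
    all_goals try (push_cast; ring_nf)
    all_goals exact ⟨trivial, trivial⟩

theorem count_substring_alphabet_eq (w : List Char) : count_substring_alphabet w = pvCnt w := by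
  unfold count_substring_alphabet pvCnt
  rw [foldl_add_element]
  simp

theorem add_element_eq (x : Int × Int × Int × Int) (c : Char) :
    add_element x c =
      (x.1 + (if c = 'A' then 1 else 0), x.2.1 + (if c = 'C' then 1 else 0),
       x.2.2.1 + (if c = 'G' then 1 else 0),
       x.2.2.2 + (if c = 'A' ∨ c = 'C' ∨ c = 'G' then 0 else 1)) := by
  unfold add_element
  split_ifs <;> simp_all

theorem subtract_element_eq (x : Int × Int × Int × Int) (c : Char) :
    subtract_element x c =
      (x.1 - (if c = 'A' then 1 else 0), x.2.1 - (if c = 'C' then 1 else 0),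
       x.2.2.1 - (if c = 'G' then 1 else 0),
       x.2.2.2 - (if c = 'A' ∨ c = 'C' ∨ c = 'G' then 0 else 1)) := by
  unfold subtract_element
  split_ifs <;> simp_all

-- one sliding step: subtract the leaving char, add the entering char
set_option maxHeartbeats 2000000 in
theorem slide_step (l : List Char) (s k : Nat) (h : k + s < l.length) :
    add_element (subtract_element (pvCnt ((l.drop k).take s)) (l[k]'(by omega)))
        (l[k + s]'(by omega))
      = pvCnt ((l.drop (k + 1)).take s) := by
  have hk : k < l.length := by omega
  have hd : s < (l.drop k).length := by simp; omega
  have hw : (l[k]'hk) :: (l.drop (k + 1)).take s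
      = ((l.drop k).take s) ++ [l[k + s]'h] := by
    have e1 : (l.drop k).take (s + 1) = (l[k]'hk) :: (l.drop (k + 1)).take s := by
      rw [List.drop_eq_getElem_cons hk]
      rfl
    have e2 : (l.drop k).take (s + 1) = ((l.drop k).take s) ++ [l[k + s]'h] := by
      rw [List.take_succ, List.getElem?_eq_getElem hd]
      simp
    rw [← e1, e2]
  have ha := congrArg (List.count 'A') hw
  have hc := congrArg (List.count 'C') hw
  have hg := congrArg (List.count 'G') hw
  have hlen := congrArg List.length hw
  simp only [List.count_cons, List.count_append, List.count_singleton, List.count_nil,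
    List.length_cons, List.length_append, List.length_singleton, beq_iff_eq] at ha hc hg hlen
  rw [subtract_element_eq, add_element_eq]
  unfold pvCnt
  simp only [Prod.mk.injEq]
  by_cases hx1 : l[k]'hk = 'A' <;> by_cases hx2 : l[k]'hk = 'C' <;>
    by_cases hx3 : l[k]'hk = 'G' <;> by_cases hy1 : l[k + s]'h = 'A' <;>
    by_cases hy2 : l[k + s]'h = 'C' <;> by_cases hy3 : l[k + s]'h = 'G' <;>
    simp_all <;> omega

-- B's window test equals A's is_acceptable on the reference counts
theorem accept_eq (w : List Char) (constraints : List Int) :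
    ((PySem.List.pyRange 0 4 1).all
        (fun k => decide (PySem.List.pyGetD constraints k 0 ≤
          PySem.List.pyGetD
            [ (w.count 'A' : Int), (w.count 'C' : Int), (w.count 'G' : Int),
              (w.length : Int) - w.count 'A' - w.count 'C' - w.count 'G' ] k 0)))
      = is_acceptable (pvCnt w) constraints := by
  have hr : PySem.List.pyRange 0 4 1 = [0, 1, 2, 3] := by decide
  rw [hr]
  simp [is_acceptable, pvCnt, PySem.List.pyGetD_ofNat', PySem.List.pyGetD_zero,
    Bool.and_assoc]

-- A's loop, characterised: after m sliding steps the state holds the counts of window m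
-- and the number of accepted windows 1..m
theorem loopA (l : List Char) (constraints : List Int) (s : Nat) (r0 : Int) (m : Nat)
    (h : s + m ≤ l.length) :
    (PySem.List.pyRange (s : Int) ((s : Int) + (m : Int)) 1).foldl
      (fun (st : (Int × Int × Int × Int) × Int) i =>
        let c1 := subtract_element st.1 (PySem.List.pyGetD l (i - (s : Int)) ' ')
        let c2 := add_element c1 (PySem.List.pyGetD l i ' ')
        (c2, if is_acceptable c2 constraints then st.2 + 1 else st.2))
      (pvCnt (l.take s), r0)
    = (pvCnt ((l.drop m).take s),
       r0 + ((List.range m).countP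
         (fun j => is_acceptable (pvCnt ((l.drop (j + 1)).take s)) constraints) : Int)) := by
  induction m with
  | zero => simp [PySem.List.pyRange_one_eq_nil]
  | succ m ih =>
    have hb : (s : Int) ≤ (s : Int) + (m : Int) := by omega
    have hcast : ((s : Int) + ((m + 1 : Nat) : Int)) = ((s : Int) + (m : Int)) + 1 := by
      push_cast; ring
    rw [hcast, PySem.List.pyRange_one_succ_right hb, List.foldl_append, ih (by omega)]
    simp only [List.foldl_cons, List.foldl_nil]
    have hmn : m < l.length := by omega
    have hms : m + s < l.length := by omega
    have e0 : (s : Int) + (m : Int) - (s : Int) = ((m : Nat) : Int) := by ring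
    have e1 : PySem.List.pyGetD l ((m : Nat) : Int) ' ' = l[m]'hmn := by
      rw [PySem.List.pyGetD_natCast]; exact List.getD_eq_getElem l ' ' hmn
    have e2 : PySem.List.pyGetD l ((s : Int) + (m : Int)) ' ' = l[m + s]'hms := by
      have : (s : Int) + (m : Int) = ((m + s : Nat) : Int) := by push_cast; ring
      rw [this, PySem.List.pyGetD_natCast]; exact List.getD_eq_getElem l ' ' hms
    rw [e0, e1, e2, slide_step l s m hms]
    rw [List.range_succ, List.countP_append, List.countP_cons, List.countP_nil]
    by_cases hacc : is_acceptable (pvCnt ((l.drop (m + 1)).take s)) constraints <;>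
      simp [hacc] <;> push_cast <;> ring

-- ===== VERDICT (by name: the statement is the Claim_ definition above) =====
theorem get_password_count_spec : Claim_equal_get_password_count := by
  unfold Claim_equal_get_password_count
  intro DNA size constraints _ hpre
  obtain ⟨hs, -⟩ := hpre
  obtain ⟨s, rfl⟩ : ∃ s : Nat, size = (s : Int) := ⟨size.toNat, by omega⟩
  unfold Spec_get_password_count get_password_count get_password_count_alt
  simp only []
  set l := DNA.toList with hl
  set n := l.length with hn
  -- B: each window test is the acceptance test on the window's reference counts
  have hW : (max 0 ((n : Int) - (s : Int)) + 1) = ((n - s + 1 : Nat) : Int) := by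
    push_cast; omega
  have hB : (PySem.List.pyRange 0 (max 0 ((n : Int) - (s : Int)) + 1) 1).foldl
      (fun result i =>
        let w := PySem.List.slice l (some i) (some (i + (s : Int)))
        let tally : List Int :=
          [ w.count 'A', w.count 'C', w.count 'G',
            (w.length : Int) - w.count 'A' - w.count 'C' - w.count 'G' ]
        if (PySem.List.pyRange 0 4 1).all
             (fun k => decide (PySem.List.pyGetD constraints k 0 ≤ PySem.List.pyGetD tally k 0))
        then result + 1 else result) 0
      = ((List.range (n - s + 1)).countP
          (fun j => is_acceptable (pvCnt ((l.drop j).take s)) constraints) : Int) := by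
    rw [hW, PySem.List.pyRange_zero_natCast, List.foldl_map]
    simp only [PySem.List.slice_natCast_add, accept_eq]
    rw [PySem.List.foldl_if_add_one]
    simp
  rw [hB]
  -- A: initial window
  rw [PySem.List.slice_to_natCast, count_substring_alphabet_eq]
  by_cases hsn : s ≤ n
  · -- sliding case: n - s steps
    have hcast : (n : Int) = (s : Int) + ((n - s : Nat) : Int) := by push_cast; omega
    rw [show ((l.length : Int)) = (s : Int) + ((n - s : Nat) : Int) from hcast]
    by_cases h0 : is_acceptable (pvCnt (l.take s)) constraints <;>
      · simp only [h0, if_true, if_false, loopA l constraints s _ (n - s) (by omega)]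
        rw [List.range_succ_eq_map, List.countP_cons, List.countP_map]
        have hshift : ((fun j => is_acceptable (pvCnt ((l.drop j).take s)) constraints)
              ∘ Nat.succ)
            = fun j => is_acceptable (pvCnt ((l.drop (j + 1)).take s)) constraints := by
          funext j
          rfl
        rw [hshift]
        simp [h0]
        try omega
  · -- size exceeds the string: A checks only the initial (short) window; B has one window
    have hnil : PySem.List.pyRange (s : Int) ((l.length : Int)) 1 = [] :=
      PySem.List.pyRange_one_eq_nil (by omega)
    rw [hnil]
    have h1 : n - s + 1 = 1 := by omega
    have htake : l.take s = l := List.take_of_length_le (by omega)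
    rw [h1, htake]
    simp [List.countP_cons, htake]
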